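-- pv_equiv track=rewrite | github.com/gongruigr/python | interesting/num2chinese.py | num2chinese_4
-- ===== SOURCE A (Python) =====
-- def num2chinese_4(string):
-- 	chinese=[]
-- 	flag=0
-- 	dict_num={'0':'零','1':'一','2':'二','3':'三','4':'四','5':'五','6':'六','7':'七','8':'八','9':'九'}
-- 	dict_position={3:'千',2:'百',1:'十',0:''}
-- 	if(string=='0000'):
-- 		chinese.append(dict_num['0'])
-- 	else:
-- 		for i in range(len(string)):
-- 			if(string[i]=='0'):
-- 				flag=1
-- 			else:
-- 				if(flag==1):
-- 					flag=0
-- 					chinese.append(dict_num['0'])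
-- 				else:
-- 					pass
-- 				chinese.append(dict_num[string[i]])
-- 				chinese.append(dict_position[len(string)-i-1])
-- 	return chinese
-- ===== SOURCE B (Python) =====
-- def num2chinese_4(string):
--     dict_num = {'0': '零', '1': '一', '2': '二', '3': '三', '4': '四',
--                 '5': '五', '6': '六', '7': '七', '8': '八', '9': '九'}
--     dict_position = {3: '千', 2: '百', 1: '十', 0: ''}
--     if string == '0000':
--         return [dict_num['0']]
--     n = len(string)
--     # staged: drop trailing zeros (they emit nothing), then split the rest on '0';
--     # every segment after the first is preceded by at least one zero -> one marker.
--     segments = string.rstrip('0').split('0')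
--     out = []
--     base = 0
--     for k, seg in enumerate(segments):
--         if seg:
--             if k > 0:
--                 out.append(dict_num['0'])
--             for j, c in enumerate(seg):
--                 out.append(dict_num[c])
--                 out.append(dict_position[n - (base + j) - 1])
--         base += len(seg) + 1
--     return out
-- ===== Notes on version B (the rewrite author's own statement) =====
-- stated objective: alternative
-- what changed: Replaces A's character-by-character zero-seen flag state machine with a staged pipeline: strip trailing zeros, split the remainder at the zero digits into zero-free chunks, then emit each chunk with one zero marker before every chunk after the first.
import Mathlib
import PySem

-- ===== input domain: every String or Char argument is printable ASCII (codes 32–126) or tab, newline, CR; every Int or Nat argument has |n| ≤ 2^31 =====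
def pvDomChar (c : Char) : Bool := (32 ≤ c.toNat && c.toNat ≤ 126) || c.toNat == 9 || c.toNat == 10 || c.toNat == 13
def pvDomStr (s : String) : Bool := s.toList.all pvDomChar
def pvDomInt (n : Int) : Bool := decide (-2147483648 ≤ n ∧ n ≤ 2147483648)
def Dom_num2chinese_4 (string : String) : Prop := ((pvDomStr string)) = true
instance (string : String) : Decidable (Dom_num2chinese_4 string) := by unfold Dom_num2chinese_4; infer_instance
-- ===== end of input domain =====

-- B replaces A's per-character zero-seen flag state machine with a staged pipeline:
-- strip trailing zeros, split the rest on '0', then emit each nonzero chunk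
-- (a single zero marker before every chunk after the first) — objective: alternative.

-- Shared data tables (the Python dict literals; default "" is unreachable under Pre_).
def dictNum (c : Char) : String :=
  match c with
  | '0' => "零" | '1' => "一" | '2' => "二" | '3' => "三" | '4' => "四"
  | '5' => "五" | '6' => "六" | '7' => "七" | '8' => "八" | '9' => "九"
  | _ => ""

def dictPos (k : Int) : String :=
  if k = 3 then "千" else if k = 2 then "百" else if k = 1 then "十"
  else if k = 0 then "" else ""

-- ===== PORT A =====
-- the for-loop over range(len(string)) with state (chinese, flag)
def goA (n : Int) : List (Int × Char) → List String → Bool → List String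
  | [], acc, _ => acc
  | (i, c) :: rest, acc, flag =>
    if c = '0' then goA n rest acc true
    else goA n rest (acc ++ (if flag then [dictNum '0'] else [])
                         ++ [dictNum c, dictPos (n - i - 1)]) false

def num2chinese_4 (string : String) : List String :=
  if string = "0000" then [dictNum '0']
  else goA (string.toList.length : Int) (PySem.List.enumerate string.toList) [] false

-- ===== PORT B =====
-- inner loop: for j, c in enumerate(seg): append digit word and place word (b = base + j)
def goSeg (n : Int) : Int → List Char → List String → List String
  | _, [], acc => acc
  | b, c :: rest, acc => goSeg n (b + 1) rest (acc ++ [dictNum c, dictPos (n - b - 1)])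

-- outer loop: for k, seg in enumerate(segments), state (out, base)
def goSegs (n : Int) : List (List Char) → List String → Int → Int → List String
  | [], acc, _, _ => acc
  | seg :: rest, acc, base, k =>
      goSegs n rest
        (if seg = [] then acc
         else goSeg n base seg (acc ++ (if k > 0 then [dictNum '0'] else [])))
        (base + (seg.length : Int) + 1) (k + 1)

def num2chinese_4_alt (string : String) : List String :=
  if string = "0000" then [dictNum '0']
  else
    -- string.rstrip('0') ported as List.rdropWhile, str.split('0') as List.splitOn
    -- (both exact for a single-character argument)
    let segments := (List.rdropWhile (fun c => c == '0') string.toList).splitOn '0'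
    goSegs (string.toList.length : Int) segments [] 0 0

-- ===== PRECONDITION & SPEC =====
-- Pre_ = exactly the inputs where Python A returns: every character is a decimal digit
-- (else dict_num raises KeyError) and every nonzero digit sits in the last four positions
-- (else dict_position raises KeyError).
def Pre_num2chinese_4 (string : String) : Prop :=
  (string.toList.all (fun c => c.isDigit)
    && (PySem.List.enumerate string.toList).all
        (fun p => p.2 == '0' || decide ((string.toList.length : Int) - p.1 - 1 ≤ 3))) = true
instance (string : String) : Decidable (Pre_num2chinese_4 string) := by
  unfold Pre_num2chinese_4; infer_instance

def pvWitness_num2chinese_4 : String := "12"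

def Spec_num2chinese_4 (string : String) (out : List String) : Prop := out = num2chinese_4_alt string
instance (string : String) (out : List String) : Decidable (Spec_num2chinese_4 string out) := by unfold Spec_num2chinese_4; infer_instance

-- ===== CLAIM (what is proved, stated in full; the proofs are below) =====
def Claim_equal_num2chinese_4 : Prop := ∀ (string : String), Dom_num2chinese_4 string → Pre_num2chinese_4 string → Spec_num2chinese_4 string (num2chinese_4 string)

-- ===== LEMMAS AND PROOFS =====

-- A emits nothing on a run of zeros (only the flag changes).
lemma goA_all_zero (n : Int) (e : List (Int × Char)) (h : ∀ p ∈ e, p.2 = '0') :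
    ∀ acc flag, goA n e acc flag = acc := by
  induction e with
  | nil => intro acc flag; rfl
  | cons p rest ih =>
    intro acc flag
    obtain ⟨i, c⟩ := p
    have hc : c = '0' := h (i, c) (by simp)
    simp only [goA, if_pos hc]
    exact ih (fun q hq => h q (by simp [hq])) acc true

-- trailing zeros can be cut off before running A's loop
lemma goA_append_zeros (n : Int) (e1 e2 : List (Int × Char)) (h : ∀ p ∈ e2, p.2 = '0') :
    ∀ acc flag, goA n (e1 ++ e2) acc flag = goA n e1 acc flag := by
  induction e1 with
  | nil => intro acc flag; simpa [goA] using goA_all_zero n e2 h acc flag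
  | cons p rest ih =>
    intro acc flag
    obtain ⟨i, c⟩ := p
    by_cases hc : c = '0' <;> simp [goA, hc, ih]

-- A's loop across one zero-free nonempty chunk = B's inner loop (flag becomes a single marker).
lemma goA_seg (n : Int) (seg : List Char) (hz : '0' ∉ seg) (hne : seg ≠ []) :
    ∀ (b : Int) (tail : List (Int × Char)) (acc : List String) (flag : Bool),
      goA n (PySem.List.enumerate seg b ++ tail) acc flag
        = goA n tail (goSeg n b seg (acc ++ (if flag then [dictNum '0'] else []))) false := by
  induction seg with
  | nil => exact absurd rfl hne
  | cons c rest ih =>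
    intro b tail acc flag
    have hc : c ≠ '0' := by intro h; exact hz (by simp [h])
    rw [PySem.List.enumerate_cons, List.cons_append]
    simp only [goA, if_neg hc, goSeg]
    by_cases hr : rest = []
    · subst hr
      simp [PySem.List.enumerate_nil, goSeg, List.append_assoc]
    · have := ih (fun h => hz (by simp [h])) hr (b + 1) tail
        (acc ++ (if flag then [dictNum '0'] else []) ++ [dictNum c, dictPos (n - b - 1)]) false
      simpa [List.append_assoc] using this

-- B's outer loop output only depends on the sign test of k
lemma goSegs_k (n : Int) (segs : List (List Char)) :
    ∀ (acc : List String) (b k k' : Int), 0 < k → 0 < k' →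
      goSegs n segs acc b k = goSegs n segs acc b k' := by
  induction segs with
  | nil => intro _ _ _ _ _ _; rfl
  | cons seg rest ih =>
    intro acc b k k' hk hk'
    simp only [goSegs, if_pos hk, if_pos hk']
    exact ih _ _ _ _ (by omega) (by omega)

-- main invariant: A with flag raised = B's outer loop with positive k
lemma goA_segs (n : Int) (segs : List (List Char)) (hz : ∀ l ∈ segs, '0' ∉ l) :
    ∀ (b : Int) (acc : List String),
      goA n (PySem.List.enumerate (List.intercalate ['0'] segs) b) acc true
        = goSegs n segs acc b 1 := by
  induction segs with
  | nil => intro b acc; simp [List.intercalate, PySem.List.enumerate_nil, goA, goSegs]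
  | cons s rest ih =>
    intro b acc
    cases rest with
    | nil =>
      have hI : List.intercalate ['0'] [s] = s := by simp [List.intercalate]
      by_cases hs : s = []
      · subst hs; simp [hI, PySem.List.enumerate_nil, goA, goSegs]
      · rw [hI]
        have := goA_seg n s (hz s (by simp)) hs b [] acc true
        simpa [goA, goSegs, hs] using this
    | cons s2 rest2 =>
      have hI : List.intercalate ['0'] (s :: s2 :: rest2)
          = s ++ '0' :: List.intercalate ['0'] (s2 :: rest2) := by
        simp [List.intercalate, List.intersperse]
      rw [hI, PySem.List.enumerate_append, PySem.List.enumerate_cons]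
      have ihz : ∀ l ∈ s2 :: rest2, '0' ∉ l := fun l hl => hz l (by simp [hl])
      by_cases hs : s = []
      · subst hs
        have h0 := ih ihz (b + 1) acc
        rw [goSegs_k n (s2 :: rest2) acc (b + 1) 1 2 (by norm_num) (by norm_num)] at h0
        simpa [goA, goSegs] using h0
      · rw [goA_seg n s (hz s (by simp)) hs b _ acc true]
        have h0 := ih ihz (b + s.length + 1) (goSeg n b s (acc ++ [dictNum '0']))
        rw [goSegs_k n (s2 :: rest2) _ _ 1 2 (by norm_num) (by norm_num)] at h0
        simpa [goA, goSegs, hs, add_assoc] using h0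

-- pieces of splitOnP never contain a separator
lemma splitOnP_mem_not (p : Char → Bool) (xs : List Char) :
    ∀ l ∈ xs.splitOnP p, ∀ x ∈ l, ¬ p x := by
  induction xs with
  | nil => intro l hl x hx; simp [List.splitOnP_nil] at hl; subst hl; simp at hx
  | cons c rest ih =>
    intro l hl x hx
    rw [List.splitOnP_cons] at hl
    by_cases hc : p c
    · rw [if_pos hc] at hl
      rcases List.mem_cons.mp hl with h | h
      · subst h; simp at hx
      · exact ih l h x hx
    · rw [if_neg hc] at hl
      cases hsp : rest.splitOnP p with
      | nil => exact absurd hsp (List.splitOnP_ne_nil p rest)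
      | cons h t =>
        rw [hsp, List.modifyHead] at hl
        rcases List.mem_cons.mp hl with h1 | h1
        · subst h1
          rcases List.mem_cons.mp hx with h2 | h2
          · subst h2; exact hc
          · exact ih h (by rw [hsp]; simp) x h2
        · exact ih l (by rw [hsp]; simp [h1]) x hx

-- head of the segment list: A starting with flag down = B's outer loop with k = 0
lemma goA_core (n : Int) (s0 : List Char) (rest : List (List Char))
    (hz : ∀ l ∈ s0 :: rest, '0' ∉ l) (b : Int) (acc : List String) :
    goA n (PySem.List.enumerate (List.intercalate ['0'] (s0 :: rest)) b) acc false
      = goSegs n (s0 :: rest) acc b 0 := by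
  cases rest with
  | nil =>
    have hI : List.intercalate ['0'] [s0] = s0 := by simp [List.intercalate]
    by_cases hs : s0 = []
    · subst hs; simp [hI, PySem.List.enumerate_nil, goA, goSegs]
    · rw [hI]
      have := goA_seg n s0 (hz s0 (by simp)) hs b [] acc false
      simpa [goA, goSegs, hs] using this
  | cons s2 rest2 =>
    have hI : List.intercalate ['0'] (s0 :: s2 :: rest2)
        = s0 ++ '0' :: List.intercalate ['0'] (s2 :: rest2) := by
      simp [List.intercalate, List.intersperse]
    rw [hI, PySem.List.enumerate_append, PySem.List.enumerate_cons]
    have ihz : ∀ l ∈ s2 :: rest2, '0' ∉ l := fun l hl => hz l (by simp [hl])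
    by_cases hs : s0 = []
    · subst hs
      have h0 := goA_segs n (s2 :: rest2) ihz (b + 1) acc
      simpa [goA, goSegs] using h0
    · rw [goA_seg n s0 (hz s0 (by simp)) hs b _ acc false]
      have h0 := goA_segs n (s2 :: rest2) ihz (b + s0.length + 1) (goSeg n b s0 (acc ++ []))
      simpa [goA, goSegs, hs, add_assoc] using h0

lemma ports_eq (string : String) : num2chinese_4 string = num2chinese_4_alt string := by
  unfold num2chinese_4 num2chinese_4_alt
  by_cases h : string = "0000"
  · simp [h]
  · simp only [if_neg h]
    set cs := string.toList with hcs
    set core := List.rdropWhile (fun c => c == '0') cs with hcore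
    have hsplit : core ++ List.rtakeWhile (fun c => c == '0') cs = cs :=
      List.rdropWhile_append_rtakeWhile
    have hz2 : ∀ p ∈ PySem.List.enumerate (List.rtakeWhile (fun c => c == '0') cs)
        ((core.length : Int)), p.2 = '0' := by
      intro p hp
      rcases (PySem.List.mem_enumerate_iff _ _ _).mp hp with ⟨k, hk, rfl⟩
      have : (List.rtakeWhile (fun c => c == '0') cs)[k] ∈
          List.rtakeWhile (fun c => c == '0') cs := List.getElem_mem hk
      have := List.mem_rtakeWhile_imp this
      simpa using this
    have hel : PySem.List.enumerate cs 0
        = PySem.List.enumerate core 0 ++ PySem.List.enumerate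
            (List.rtakeWhile (fun c => c == '0') cs) (0 + core.length) := by
      conv_lhs => rw [← hsplit]
      exact PySem.List.enumerate_append core _ 0
    have h1 : goA (cs.length : Int) (PySem.List.enumerate cs) [] false
        = goA (cs.length : Int) (PySem.List.enumerate core) [] false := by
      rw [show PySem.List.enumerate cs = PySem.List.enumerate cs 0 from rfl, hel,
        goA_append_zeros _ _ _ (by simpa using hz2)]
    have hzero : ∀ l ∈ core.splitOn '0', '0' ∉ l := by
      intro l hl hx
      exact splitOnP_mem_not (fun x => x == '0') core l hl '0' hx (by simp)
    have hI : List.intercalate ['0'] (core.splitOn '0') = core :=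
      List.intercalate_splitOn (xs := core) '0'
    cases hsegs : core.splitOn '0' with
    | nil => exact absurd hsegs (List.splitOnP_ne_nil _ core)
    | cons s0 rest =>
      rw [h1]
      have : PySem.List.enumerate core 0
          = PySem.List.enumerate (List.intercalate ['0'] (s0 :: rest)) 0 := by
        rw [← hsegs, hI]
      rw [show PySem.List.enumerate core = PySem.List.enumerate core 0 from rfl, this]
      exact goA_core (cs.length : Int) s0 rest (hsegs ▸ hzero) 0 []

-- ===== VERDICT (by name: the statement is the Claim_ definition above) =====
theorem num2chinese_4_spec : Claim_equal_num2chinese_4 := by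
  intro string _ _
  unfold Spec_num2chinese_4
  exact ports_eq string
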